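-- pv_equiv track=rewrite | github.com/ZicsX/CP | Full_Path_Eraser.py | compute
-- ===== SOURCE A (Python) =====
-- from math import gcd
--
-- def compute(idx, parentV, adjList, values, intermediate, final):
--     curr = values[idx]
--     sum = 0
--     for i in adjList[idx]:
--         if i != parentV:
--             child = compute(i, idx, adjList, values, intermediate, final)
--             sum += child
--             curr = gcd(curr, child)
--     intermediate[idx] = curr
--     final[idx] = sum
--     return curr
-- ===== SOURCE B (Python) =====
-- from math import gcd
--
-- def compute(idx, parentV, adjList, values, intermediate, final):
--     # Iterative explicit-stack post-order traversal (no recursion).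
--     # Frame: [node, parent, running gcd, running child sum, next-neighbour position]
--     stack = [[idx, parentV, values[idx], 0, 0]]
--     while True:
--         frame = stack[-1]
--         node, par, curr, s, pos = frame
--         nbrs = adjList[node]
--         if pos < len(nbrs):
--             frame[4] = pos + 1
--             i = nbrs[pos]
--             if i != par:
--                 stack.append([i, node, values[i], 0, 0])
--         else:
--             stack.pop()
--             intermediate[node] = curr
--             final[node] = s
--             if not stack:
--                 return curr
--             pf = stack[-1]
--             pf[2] = gcd(pf[2], curr)
--             pf[3] += curr
-- ===== Notes on version B (the rewrite author's own statement) =====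
-- stated objective: alternative
-- what changed: Replaces A's recursive DFS by an iterative explicit-stack post-order traversal whose frames carry (node, parent, running gcd, running child-sum, next-neighbour position) and fold each finished subtree into its parent's frame.
import Mathlib
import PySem

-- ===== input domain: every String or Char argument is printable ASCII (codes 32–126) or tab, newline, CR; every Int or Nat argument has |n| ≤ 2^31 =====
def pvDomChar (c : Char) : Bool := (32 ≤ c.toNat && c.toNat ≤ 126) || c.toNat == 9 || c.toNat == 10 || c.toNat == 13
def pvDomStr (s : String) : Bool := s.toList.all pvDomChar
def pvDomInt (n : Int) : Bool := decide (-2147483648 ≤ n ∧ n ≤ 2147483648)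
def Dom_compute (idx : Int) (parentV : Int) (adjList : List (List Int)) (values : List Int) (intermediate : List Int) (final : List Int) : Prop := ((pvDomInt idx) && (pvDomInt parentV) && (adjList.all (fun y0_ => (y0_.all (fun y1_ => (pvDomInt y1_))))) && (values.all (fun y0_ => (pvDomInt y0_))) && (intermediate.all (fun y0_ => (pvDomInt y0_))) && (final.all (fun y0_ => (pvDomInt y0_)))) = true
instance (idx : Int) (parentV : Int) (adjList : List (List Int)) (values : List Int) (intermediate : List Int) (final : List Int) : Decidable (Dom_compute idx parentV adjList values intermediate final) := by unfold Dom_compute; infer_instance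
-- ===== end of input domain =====

-- B replaces A's recursive DFS by an iterative explicit-stack post-order traversal (alternative
-- decomposition, same cost). A mutates `intermediate`/`final` in place (B performs the same
-- mutations in Python); the equivalence proved here is about the RETURN value only, so the Lean
-- ports model the return value and drop the write-only arrays.

-- math.gcd on Python ints: gcd of absolute values, always non-negative
def pygcd (a b : Int) : Int := (Int.gcd a b : Int)

-- ===== PORT A =====
-- the body of A's `for i in adjList[idx]` loop: threads (curr, sum); `recf i` = the recursive call
def computeFold (recf : Int → Option Int) (parentV : Int) : List Int → Int → Int → Option (Int × Int)
  | [], curr, s => some (curr, s)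
  | i :: rest, curr, s =>
    if i ≠ parentV then
      match recf i with
      | some child => computeFold recf parentV rest (pygcd curr child) (s + child)
      | none => none
    else computeFold recf parentV rest curr s

-- A's recursion, made total by a fuel guard (fuel bounds the recursion DEPTH; on the inputs
-- admitted by Pre_ the depth never exceeds the number of distinct (node, parent) states, which
-- is at most stFuelA, so the guard never fires there)
def computeGo (adjList : List (List Int)) (values : List Int) : Nat → Int → Int → Option Int
  | 0, _, _ => none
  | fuel+1, idx, parentV =>
    match PySem.List.pyGet? values idx, PySem.List.pyGet? adjList idx with
    | some v, some _nbrs =>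
      (computeFold (fun i => computeGo adjList values fuel i idx) parentV _nbrs v 0).map (fun r => r.1)
    | _, _ => none

-- fuel for A's port: one more than the largest possible number of distinct (node, parent) states
def stFuelA (adjList : List (List Int)) : Nat :=
  adjList.flatten.length * (adjList.flatten.length + 1) + 3

def compute (idx : Int) (parentV : Int) (adjList : List (List Int)) (values : List Int) (intermediate : List Int) (final : List Int) : Int :=
  (computeGo adjList values (stFuelA adjList) idx parentV).getD 0

-- ===== PORT B =====
-- one stack frame of Source B's loop: (node, parent, running gcd, running child sum, next-neighbour pos)
-- Source B's `while True` loop, made total by a fuel guard (one unit per iteration; on the inputs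
-- admitted by Pre_ the loop runs far fewer than computeFuelB iterations)
def computeLoop (adjList : List (List Int)) (values : List Int) : Nat → List (Int × Int × Int × Int × Nat) → Option Int
  | 0, _ => none
  | _+1, [] => none
  | fuel+1, (node, par, curr, s, pos) :: rest =>
    match PySem.List.pyGet? adjList node with
    | none => none
    | some nbrs =>
      if h : pos < nbrs.length then
        let i := nbrs[pos]
        if i ≠ par then
          match PySem.List.pyGet? values i with
          | none => none
          | some vi => computeLoop adjList values fuel ((i, node, vi, 0, 0) :: (node, par, curr, s, pos + 1) :: rest)
        else computeLoop adjList values fuel ((node, par, curr, s, pos + 1) :: rest)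
      else
        match rest with
        | [] => some curr
        | (pn, pp, pc, ps, ppos) :: rest' => computeLoop adjList values fuel ((pn, pp, pygcd pc curr, ps + curr, ppos) :: rest')

def computeFuelB (adjList : List (List Int)) : Nat := (adjList.flatten.length + 3) ^ (stFuelA adjList)

def compute_alt (idx : Int) (parentV : Int) (adjList : List (List Int)) (values : List Int) (intermediate : List Int) (final : List Int) : Int :=
  match PySem.List.pyGet? values idx with
  | none => 0
  | some v => (computeLoop adjList values (computeFuelB adjList) [(idx, parentV, v, 0, 0)]).getD 0

-- ===== PRECONDITION & SPEC =====
-- neighbour list of node v (as Python reads it: adjList[v], negative v counting from the end)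
def nbrsOf (adjList : List (List Int)) (v : Int) : List Int := (PySem.List.pyGet? adjList v).getD []

-- A's recursion moves between STATES (node, parent): from (v, pv) it recurses into (i, v) for
-- every entry i of adjList[v] with i ≠ pv. Pre_ describes A's exact domain in terms of this
-- state graph of the input: every state reachable from (idx, parentV) must carry indices valid
-- for all four arrays (else Python raises IndexError) and the reachable state graph must be
-- acyclic (else the recursion never returns). Both are decided by plain graph computations on
-- the input: a breadth-first closure and iterated sink-elimination.
def stSuccs (adjList : List (List Int)) (p : Int × Int) : List (Int × Int) :=
  ((nbrsOf adjList p.1).filter (fun i => i ≠ p.2)).map (fun i => (i, p.1))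

def stGo (adjList : List (List Int)) : Nat → List (Int × Int) → List (Int × Int) → List (Int × Int)
  | 0, acc, _ => acc
  | k+1, acc, frontier =>
    let nxt := ((frontier.flatMap (stSuccs adjList)).filter (fun q => ¬ acc.contains q)).dedup
    if nxt.isEmpty then acc else stGo adjList k (acc ++ nxt) nxt

-- all states the traversal can reach from p0 (the iteration cap exceeds the number of
-- distinct states, so the closure is always complete)
def stClosure (adjList : List (List Int)) (p0 : Int × Int) : List (Int × Int) :=
  stGo adjList (adjList.flatten.length * (adjList.flatten.length + 1) + 2) [p0] [p0]

-- iterated sink-elimination: a finite directed graph is acyclic iff repeatedly deleting the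
-- states with no remaining successor deletes everything
def dagPeelStep (adjList : List (List Int)) (act : List (Int × Int)) : List (Int × Int) :=
  act.filter (fun p => (stSuccs adjList p).any (fun q => act.contains q))

def dagPeelIter (adjList : List (List Int)) : Nat → List (Int × Int) → List (Int × Int)
  | 0, act => act
  | k+1, act => dagPeelIter adjList k (dagPeelStep adjList act)

def dagCheck (adjList : List (List Int)) (R : List (Int × Int)) : Bool :=
  (dagPeelIter adjList (R.length + 1) R).isEmpty

-- Pre_ = exactly the inputs on which A returns normally: every reachable (node, parent) state
-- has a node index valid for adjList/values/intermediate/final (Python indexing: negative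
-- indices count from the end and are admitted), and the reachable state graph is acyclic,
-- i.e. the recursion terminates.
def Pre_compute (idx : Int) (parentV : Int) (adjList : List (List Int)) (values : List Int) (intermediate : List Int) (final : List Int) : Prop :=
  (idx, parentV) ∈ stClosure adjList (idx, parentV) ∧
  (∀ p ∈ stClosure adjList (idx, parentV),
      PySem.Raise.InRange adjList.length p.1 ∧ PySem.Raise.InRange values.length p.1 ∧
      PySem.Raise.InRange intermediate.length p.1 ∧ PySem.Raise.InRange final.length p.1) ∧
  (∀ p ∈ stClosure adjList (idx, parentV), ∀ q ∈ stSuccs adjList p, q ∈ stClosure adjList (idx, parentV)) ∧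
  (∀ p ∈ stClosure adjList (idx, parentV),
      p = (idx, parentV) ∨ (p.1 ∈ adjList.flatten ∧ p.2 ∈ idx :: adjList.flatten)) ∧
  dagCheck adjList (stClosure adjList (idx, parentV)) = true

instance (idx : Int) (parentV : Int) (adjList : List (List Int)) (values : List Int) (intermediate : List Int) (final : List Int) : Decidable (Pre_compute idx parentV adjList values intermediate final) := by
  unfold Pre_compute; infer_instance

def pvWitness_compute : Int × Int × List (List Int) × List Int × List Int × List Int :=
  (0, -1, [[1, 2], [0], [0]], [6, 4, 10], [0, 0, 0], [0, 0, 0])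

def Spec_compute (idx : Int) (parentV : Int) (adjList : List (List Int)) (values : List Int) (intermediate : List Int) (final : List Int) (out : Int) : Prop := out = compute_alt idx parentV adjList values intermediate final
instance (idx : Int) (parentV : Int) (adjList : List (List Int)) (values : List Int) (intermediate : List Int) (final : List Int) (out : Int) : Decidable (Spec_compute idx parentV adjList values intermediate final out) := by unfold Spec_compute; infer_instance

-- ===== CLAIM (what is proved, stated in full; the proofs are below) =====
def Claim_equal_compute : Prop := ∀ (idx : Int) (parentV : Int) (adjList : List (List Int)) (values : List Int) (intermediate : List Int) (final : List Int), Dom_compute idx parentV adjList values intermediate final → Pre_compute idx parentV adjList values intermediate final → Spec_compute idx parentV adjList values intermediate final (compute idx parentV adjList values intermediate final)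

-- ===== LEMMAS AND PROOFS =====

theorem pvWitness_ok :
    Dom_compute (pvWitness_compute.1) (pvWitness_compute.2.1) (pvWitness_compute.2.2.1) (pvWitness_compute.2.2.2.1) (pvWitness_compute.2.2.2.2.1) (pvWitness_compute.2.2.2.2.2) ∧
    Pre_compute (pvWitness_compute.1) (pvWitness_compute.2.1) (pvWitness_compute.2.2.1) (pvWitness_compute.2.2.2.1) (pvWitness_compute.2.2.2.2.1) (pvWitness_compute.2.2.2.2.2) := by
  constructor <;> decide

-- ---------- ghost instrumented version of A's recursion: also returns the number of
-- ---------- stack-machine steps (t) the corresponding run of B takes ----------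

def gcdFoldC (recf : Int → Option (Int × Int × Nat)) (parentV : Int) : List Int → Int → Int → Option (Int × Int × Nat)
  | [], curr, s => some (curr, s, 1)
  | i :: rest, curr, s =>
    if i ≠ parentV then
      match recf i with
      | some (g, _, t) =>
        match gcdFoldC recf parentV rest (pygcd curr g) (s + g) with
        | some (c', s', tr) => some (c', s', 1 + t + tr)
        | none => none
      | none => none
    else
      match gcdFoldC recf parentV rest curr s with
      | some (c', s', tr) => some (c', s', 1 + tr)
      | none => none

def goC (adjList : List (List Int)) (values : List Int) : Nat → Int → Int → Option (Int × Int × Nat)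
  | 0, _, _ => none
  | fuel+1, idx, parentV =>
    match PySem.List.pyGet? values idx, PySem.List.pyGet? adjList idx with
    | some v, some nbrs => gcdFoldC (fun i => goC adjList values fuel i idx) parentV nbrs v 0
    | _, _ => none

-- bridge: port A computes the first component of the ghost
theorem computeFold_eq_foldC (recf : Int → Option Int) (recfC : Int → Option (Int × Int × Nat))
    (hrec : ∀ i, recf i = (recfC i).map (fun r => r.1)) (parentV : Int) :
    ∀ (rem : List Int) (curr s : Int),
      computeFold recf parentV rem curr s = (gcdFoldC recfC parentV rem curr s).map (fun r => (r.1, r.2.1)) := by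
  intro rem
  induction rem with
  | nil => intro curr s; simp [computeFold, gcdFoldC]
  | cons i rest ih =>
    intro curr s
    simp only [computeFold, gcdFoldC, hrec i]
    by_cases hi : i ≠ parentV
    · simp only [if_pos hi]
      cases hri : recfC i with
      | none => simp
      | some r =>
        obtain ⟨g, sg, t⟩ := r
        simp only [Option.map_some]
        rw [ih]
        cases hfr : gcdFoldC recfC parentV rest (pygcd curr g) (s + g) with
        | none => simp
        | some r' => obtain ⟨c', s', tr⟩ := r'; simp
    · simp only [if_neg hi]
      rw [ih]
      cases hfr : gcdFoldC recfC parentV rest curr s with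
      | none => simp
      | some r' => obtain ⟨c', s', tr⟩ := r'; simp

theorem computeGo_eq_goC (adjList : List (List Int)) (values : List Int) :
    ∀ (fuel : Nat) (idx parentV : Int),
      computeGo adjList values fuel idx parentV = (goC adjList values fuel idx parentV).map (fun r => r.1) := by
  intro fuel
  induction fuel with
  | zero => intro idx parentV; simp [computeGo, goC]
  | succ f ih =>
    intro idx parentV
    simp only [computeGo, goC]
    cases hv : PySem.List.pyGet? values idx with
    | none => simp
    | some v =>
      cases ha : PySem.List.pyGet? adjList idx with
      | none => simp
      | some nbrs =>
        simp only []
        rw [computeFold_eq_foldC (fun i => computeGo adjList values f i idx)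
              (fun i => goC adjList values f i idx) (fun i => ih i idx) parentV nbrs v 0]
        cases gcdFoldC (fun i => goC adjList values f i idx) parentV nbrs v 0 with
        | none => simp
        | some r => simp

-- ---------- the stack machine consumes exactly t steps per completed subtree ----------

-- state of B's machine after a finished subtree hands its gcd g back to the parent frame
def goBpop (adjList : List (List Int)) (values : List Int) (fuel : Nat)
    (rest : List (Int × Int × Int × Int × Nat)) (g : Int) : Option Int :=
  match rest with
  | [] => some g
  | (pn, pp, pc, ps, ppos) :: rest' => computeLoop adjList values fuel ((pn, pp, pygcd pc g, ps + g, ppos) :: rest')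

-- elimination form of a successful goC call
theorem goC_elim {adjList values} {fuel : Nat} {idx parentV : Int} {r}
    (h : goC adjList values fuel idx parentV = some r) :
    ∃ f v nbrs, fuel = f + 1 ∧ PySem.List.pyGet? values idx = some v ∧
      PySem.List.pyGet? adjList idx = some nbrs ∧
      gcdFoldC (fun i => goC adjList values f i idx) parentV nbrs v 0 = some r := by
  cases fuel with
  | zero => simp [goC] at h
  | succ f =>
    cases hv : PySem.List.pyGet? values idx with
    | none => simp [goC, hv] at h
    | some v =>
      cases ha : PySem.List.pyGet? adjList idx with
      | none => simp [goC, hv, ha] at h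
      | some nbrs =>
        refine ⟨f, v, nbrs, rfl, rfl, rfl, ?_⟩
        simpa [goC, hv, ha] using h

def SimCall (adjList : List (List Int)) (values : List Int) (f : Nat) : Prop :=
  ∀ (idx parentV v : Int) (rest : List (Int × Int × Int × Int × Nat)) (fuel : Nat) (g s : Int) (t : Nat),
    goC adjList values f idx parentV = some (g, s, t) →
    PySem.List.pyGet? values idx = some v →
    t ≤ fuel →
    computeLoop adjList values fuel ((idx, parentV, v, 0, 0) :: rest) = goBpop adjList values (fuel - t) rest g

theorem sim_fold (adjList : List (List Int)) (values : List Int) (f : Nat)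
    (hcall : SimCall adjList values f) :
    ∀ (rem : List Int) (idx parentV : Int) (nbrs : List Int) (pos : Nat) (curr s : Int)
      (rest : List (Int × Int × Int × Int × Nat)) (fuel : Nat) (g' s' : Int) (t : Nat),
      PySem.List.pyGet? adjList idx = some nbrs →
      nbrs.drop pos = rem →
      gcdFoldC (fun i => goC adjList values f i idx) parentV rem curr s = some (g', s', t) →
      t ≤ fuel →
      computeLoop adjList values fuel ((idx, parentV, curr, s, pos) :: rest) = goBpop adjList values (fuel - t) rest g' := by
  intro rem
  induction rem with
  | nil =>
    intro idx parentV nbrs pos curr s rest fuel g' s' t ha hdrop hfold ht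
    simp only [gcdFoldC, Option.some.injEq, Prod.mk.injEq] at hfold
    obtain ⟨rfl, rfl, rfl⟩ := hfold
    obtain ⟨fu, rfl⟩ : ∃ fu, fuel = fu + 1 := ⟨fuel - 1, by omega⟩
    have hpos : ¬ pos < nbrs.length := by
      have hl := congrArg List.length hdrop
      simp [List.length_drop] at hl
      omega
    simp only [computeLoop, ha, dif_neg hpos]
    cases rest with
    | nil => simp [goBpop]
    | cons pf r =>
      obtain ⟨pn, pp, pc, ps, ppos⟩ := pf
      simp [goBpop]
  | cons i rrem ih =>
    intro idx parentV nbrs pos curr s rest fuel g' s' t ha hdrop hfold ht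
    have hlen : pos < nbrs.length := by
      have hl := congrArg List.length hdrop
      simp [List.length_drop] at hl
      omega
    have hcons := List.drop_eq_getElem_cons hlen
    rw [hdrop] at hcons
    injection hcons with hget hdrop'
    -- hget : i = nbrs[pos], hdrop' : rrem = nbrs.drop (pos+1)
    simp only [gcdFoldC] at hfold
    obtain ⟨fu, rfl⟩ : ∃ fu, fuel = fu + 1 := by
      refine ⟨fuel - 1, ?_⟩
      have : 1 ≤ t := by
        by_cases hip : i ≠ parentV
        · rw [if_pos hip] at hfold
          cases hci : goC adjList values f i idx with
          | none => rw [hci] at hfold; simp at hfold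
          | some rc =>
            obtain ⟨gi, si, ti⟩ := rc
            rw [hci] at hfold
            dsimp only at hfold
            cases hfr : gcdFoldC (fun i => goC adjList values f i idx) parentV rrem (pygcd curr gi) (s + gi) with
            | none => rw [hfr] at hfold; simp at hfold
            | some rr =>
              obtain ⟨g2, s2, tr⟩ := rr
              rw [hfr] at hfold
              dsimp only at hfold
              simp only [Option.some.injEq, Prod.mk.injEq] at hfold
              omega
        · rw [if_neg hip] at hfold
          cases hfr : gcdFoldC (fun i => goC adjList values f i idx) parentV rrem curr s with
          | none => rw [hfr] at hfold; simp at hfold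
          | some rr =>
            obtain ⟨g2, s2, tr⟩ := rr
            rw [hfr] at hfold
            dsimp only at hfold
            simp only [Option.some.injEq, Prod.mk.injEq] at hfold
            omega
      omega
    by_cases hip : i ≠ parentV
    · rw [if_pos hip] at hfold
      cases hci : goC adjList values f i idx with
      | none => rw [hci] at hfold; simp at hfold
      | some rc =>
        obtain ⟨gi, si, ti⟩ := rc
        rw [hci] at hfold
        dsimp only at hfold
        cases hfr : gcdFoldC (fun i => goC adjList values f i idx) parentV rrem (pygcd curr gi) (s + gi) with
        | none => rw [hfr] at hfold; simp at hfold
        | some rr =>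
          obtain ⟨g2, s2, tr⟩ := rr
          rw [hfr] at hfold
          dsimp only at hfold
          simp only [Option.some.injEq, Prod.mk.injEq] at hfold
          obtain ⟨rfl, rfl, rfl⟩ := hfold
          obtain ⟨fc, vc, nbc, hfc, hvc, hac, _⟩ := goC_elim hci
          simp only [computeLoop, ha, dif_pos hlen, ← hget, if_pos hip, hvc]
          rw [hcall i idx vc ((idx, parentV, curr, s, pos + 1) :: rest) fu gi si ti hci hvc (by omega)]
          simp only [goBpop]
          rw [ih idx parentV nbrs (pos + 1) (pygcd curr gi) (s + gi) rest (fu - ti) g2 s2 tr ha hdrop'.symm hfr (by omega)]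
          congr 1
          omega
    · rw [if_neg hip] at hfold
      cases hfr : gcdFoldC (fun i => goC adjList values f i idx) parentV rrem curr s with
      | none => rw [hfr] at hfold; simp at hfold
      | some rr =>
        obtain ⟨g2, s2, tr⟩ := rr
        rw [hfr] at hfold
        dsimp only at hfold
        simp only [Option.some.injEq, Prod.mk.injEq] at hfold
        obtain ⟨rfl, rfl, rfl⟩ := hfold
        simp only [computeLoop, ha, dif_pos hlen, ← hget, if_neg hip]
        rw [ih idx parentV nbrs (pos + 1) curr s rest fu g2 s2 tr ha hdrop'.symm hfr (by omega)]
        congr 1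
        omega

theorem sim_call (adjList : List (List Int)) (values : List Int) :
    ∀ f, SimCall adjList values f := by
  intro f
  induction f with
  | zero => intro idx parentV v rest fuel g s t h; simp [goC] at h
  | succ f ih =>
    intro idx parentV v rest fuel g s t h hv ht
    obtain ⟨f2, v2, nbrs, hf, hv2, ha, hfold⟩ := goC_elim h
    have hff : f2 = f := by omega
    subst hff
    rw [hv] at hv2
    injection hv2 with hvv
    subst hvv
    exact sim_fold adjList values f2 ih nbrs idx parentV nbrs 0 v 0 rest fuel g s t ha (by simp) hfold ht

-- ---------- step-count bound ----------

theorem foldC_zero_t (adjList values parentV idx) :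
    ∀ (rem : List Int) (curr s g' s' : Int) (t : Nat),
      gcdFoldC (fun i => goC adjList values 0 i idx) parentV rem curr s = some (g', s', t) →
      t = 1 + rem.length := by
  intro rem
  induction rem with
  | nil =>
    intro curr s g' s' t h
    simp only [gcdFoldC, Option.some.injEq, Prod.mk.injEq] at h
    simp [← h.2.2]
  | cons i r ih =>
    intro curr s g' s' t h
    simp only [gcdFoldC] at h
    by_cases hip : i ≠ parentV
    · rw [if_pos hip] at h
      simp [goC] at h
    · rw [if_neg hip] at h
      cases hfr : gcdFoldC (fun i => goC adjList values 0 i idx) parentV r curr s with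
      | none => rw [hfr] at h; simp at h
      | some rr =>
        obtain ⟨g2, s2, tr⟩ := rr
        rw [hfr] at h
        dsimp only at h
        simp only [Option.some.injEq, Prod.mk.injEq] at h
        have := ih curr s g2 s2 tr hfr
        simp [← h.2.2, this]
        omega

theorem foldC_t_le (adjList values parentV idx : _) (f : Nat) (C : Nat)
    (hchild : ∀ (i : Int) (r : Int × Int × Nat), goC adjList values f i idx = some r → r.2.2 ≤ C) :
    ∀ (rem : List Int) (curr s g' s' : Int) (t : Nat),
      gcdFoldC (fun i => goC adjList values f i idx) parentV rem curr s = some (g', s', t) →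
      t ≤ 1 + rem.length * (1 + C) := by
  intro rem
  induction rem with
  | nil =>
    intro curr s g' s' t h
    simp only [gcdFoldC, Option.some.injEq, Prod.mk.injEq] at h
    omega
  | cons i r ih =>
    intro curr s g' s' t h
    have hexp : (r.length + 1) * (1 + C) = r.length * (1 + C) + (1 + C) := by ring
    simp only [gcdFoldC] at h
    by_cases hip : i ≠ parentV
    · rw [if_pos hip] at h
      cases hci : goC adjList values f i idx with
      | none => rw [hci] at h; simp at h
      | some rc =>
        obtain ⟨gi, si, ti⟩ := rc
        rw [hci] at h
        dsimp only at h
        cases hfr : gcdFoldC (fun i => goC adjList values f i idx) parentV r (pygcd curr gi) (s + gi) with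
        | none => rw [hfr] at h; simp at h
        | some rr =>
          obtain ⟨g2, s2, tr⟩ := rr
          rw [hfr] at h
          dsimp only at h
          simp only [Option.some.injEq, Prod.mk.injEq] at h
          have hti : ti ≤ C := hchild i (gi, si, ti) hci
          have htr := ih (pygcd curr gi) (s + gi) g2 s2 tr hfr
          simp only [List.length_cons]
          omega
    · rw [if_neg hip] at h
      cases hfr : gcdFoldC (fun i => goC adjList values f i idx) parentV r curr s with
      | none => rw [hfr] at h; simp at h
      | some rr =>
        obtain ⟨g2, s2, tr⟩ := rr
        rw [hfr] at h
        dsimp only at h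
        simp only [Option.some.injEq, Prod.mk.injEq] at h
        have htr := ih curr s g2 s2 tr hfr
        simp only [List.length_cons]
        omega

theorem goC_t_le (adjList : List (List Int)) (values : List Int) :
    ∀ (fuel : Nat) (idx parentV : Int) (g s : Int) (t : Nat),
      goC adjList values fuel idx parentV = some (g, s, t) →
      t ≤ (adjList.flatten.length + 3) ^ fuel := by
  intro fuel
  induction fuel with
  | zero => intro idx parentV g s t h; simp [goC] at h
  | succ f ih =>
    intro idx parentV g s t h
    obtain ⟨f2, v, nbrs, hf, hv, ha, hfold⟩ := goC_elim h
    have hff : f2 = f := by omega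
    subst hff
    have hmem : nbrs ∈ adjList := PySem.List.mem_of_pyGet?_eq_some (h := ha)
    have hlen : nbrs.length ≤ adjList.flatten.length :=
      (List.sublist_flatten_of_mem hmem).length_le
    cases f2 with
    | zero =>
      have := foldC_zero_t adjList values parentV idx nbrs v 0 g s t hfold
      have hpow : (adjList.flatten.length + 3) ^ (0 + 1) = adjList.flatten.length + 3 := by ring
      omega
    | succ f3 =>
      have hb := foldC_t_le adjList values parentV idx (f3 + 1) ((adjList.flatten.length + 3) ^ (f3 + 1))
        (fun i r hr => ih i idx r.1 r.2.1 r.2.2 (by simpa using hr)) nbrs v 0 g s t hfold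
      have hC : adjList.flatten.length + 3 ≤ (adjList.flatten.length + 3) ^ (f3 + 1) :=
        Nat.le_self_pow (by omega) _
      have hmul : nbrs.length * (1 + (adjList.flatten.length + 3) ^ (f3 + 1)) ≤
          adjList.flatten.length * (1 + (adjList.flatten.length + 3) ^ (f3 + 1)) :=
        Nat.mul_le_mul_right _ hlen
      have hexp1 : adjList.flatten.length * (1 + (adjList.flatten.length + 3) ^ (f3 + 1)) =
          adjList.flatten.length + adjList.flatten.length * (adjList.flatten.length + 3) ^ (f3 + 1) := by ring
      have hexp2 : (adjList.flatten.length + 3) ^ (f3 + 1 + 1) =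
          adjList.flatten.length * (adjList.flatten.length + 3) ^ (f3 + 1) + 3 * (adjList.flatten.length + 3) ^ (f3 + 1) := by ring
      omega

-- ---------- termination theory on the directed state graph ----------

-- a duplicate-free list contained in another list is no longer than it
theorem nodup_subset_length {α : Type} [DecidableEq α] {l m : List α}
    (hnd : l.Nodup) (hsub : ∀ x ∈ l, x ∈ m) : l.length ≤ m.length := by
  have h1 : l.toFinset ⊆ m.toFinset := by
    intro x hx
    rw [List.mem_toFinset] at hx ⊢
    exact hsub x hx
  have h2 := Finset.card_le_card h1
  rw [List.toFinset_card_of_nodup hnd] at h2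
  exact h2.trans (List.toFinset_card_le m)

-- soundness of iterated sink-elimination: every nonempty subset of a peelable set has a sink
def DagProp (adjList : List (List Int)) (R : List (Int × Int)) : Prop :=
  ∀ S : List (Int × Int), S ≠ [] → (∀ p ∈ S, p ∈ R) →
    ∃ p ∈ S, ∀ q ∈ stSuccs adjList p, q ∉ S

theorem dagPeelIter_sound (adjList : List (List Int)) :
    ∀ (k : Nat) (act S : List (Int × Int)), (∀ p ∈ S, p ∈ act) → S ≠ [] →
      dagPeelIter adjList k act = [] →
      ∃ p ∈ S, ∀ q ∈ stSuccs adjList p, q ∉ S := by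
  intro k
  induction k with
  | zero =>
    intro act S hSa hne hit
    simp only [dagPeelIter] at hit
    subst hit
    obtain ⟨p, hp⟩ := List.exists_mem_of_ne_nil S hne
    exact absurd (hSa p hp) (List.not_mem_nil)
  | succ k ih =>
    intro act S hSa hne hit
    simp only [dagPeelIter] at hit
    by_cases hex : ∃ p ∈ S, ∀ q ∈ stSuccs adjList p, q ∉ S
    · exact hex
    · refine ih (dagPeelStep adjList act) S ?_ hne hit
      intro p hp
      have hsucc : ∃ q ∈ stSuccs adjList p, q ∈ S := by
        by_contra hno
        exact hex ⟨p, hp, fun q hq hqS => hno ⟨q, hq, hqS⟩⟩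
      obtain ⟨q, hq, hqS⟩ := hsucc
      unfold dagPeelStep
      rw [List.mem_filter]
      refine ⟨hSa p hp, ?_⟩
      rw [List.any_eq_true]
      exact ⟨q, hq, by simpa using hSa q hqS⟩

theorem dagCheck_sound (adjList : List (List Int)) (R : List (Int × Int))
    (h : dagCheck adjList R = true) : DagProp adjList R := by
  intro S hne hSR
  unfold dagCheck at h
  rw [List.isEmpty_iff] at h
  exact dagPeelIter_sound adjList (R.length + 1) R S hSR hne h

-- the invariant of A's call stack: the current state and its ancestors are reachable,
-- pairwise distinct, and consecutive ones are successor-related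
def PathInv (adjList : List (List Int)) (R : List (Int × Int)) (path : List (Int × Int)) (p : Int × Int) : Prop :=
  (∀ q ∈ p :: path, q ∈ R) ∧ (p :: path).Nodup ∧
  List.IsChain (fun a b => a ∈ stSuccs adjList b) (p :: path)

-- a successor of the current state never re-enters the call stack (else the reachable state
-- graph would contain a cycle, contradicting the sink-elimination certificate)
theorem no_reenter (adjList : List (List Int)) (R : List (Int × Int)) (hdag : DagProp adjList R)
    (path : List (Int × Int)) (p : Int × Int) (hinv : PathInv adjList R path p)
    (q : Int × Int) (hq : q ∈ stSuccs adjList p) (hqR : q ∈ R) : q ∉ p :: path := by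
  obtain ⟨hR, hnd, hchain⟩ := hinv
  intro hmem
  obtain ⟨j, hj, hje⟩ := List.mem_iff_getElem.mp hmem
  have hrel := List.isChain_iff_getElem.mp hchain
  -- the cycle: the stack segment from the current state down to q
  obtain ⟨r, hrS, hrsink⟩ := hdag ((p :: path).take (j+1))
    (by simp [List.take_succ_cons])
    (fun x hx => hR x (List.mem_of_mem_take hx))
  obtain ⟨m, hm, hre⟩ := List.mem_iff_getElem.mp hrS
  have hmlen : m < j + 1 := by
    have h2 := hm
    rw [List.length_take] at h2
    omega
  have hSm : ∀ (k : Nat) (hk : k < j + 1), ((p :: path).take (j+1))[k]'(by rw [List.length_take]; omega) = (p :: path)[k]'(by omega) := by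
    intro k hk
    cases k with
    | zero => simp
    | succ k' => simp [List.getElem_cons_succ, List.getElem_take]
  cases m with
  | zero =>
    -- the current state p has successor q = (p :: path)[j] inside the segment
    refine hrsink q (by rw [← hre, hSm 0 (by omega)]; exact hq) ?_
    rw [← hje]
    refine List.mem_iff_getElem.mpr ⟨j, by rw [List.length_take]; omega, ?_⟩
    exact hSm j (by omega)
  | succ m' =>
    -- state (p::path)[m'+1] has successor (p::path)[m'] inside the segment
    have hsm : (p :: path)[m']'(by omega) ∈ stSuccs adjList ((p :: path)[m'+1]'(by omega)) := by
      have := hrel m' (by omega)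
      exact this
    refine hrsink ((p :: path)[m']'(by omega)) (by rw [← hre, hSm (m'+1) (by omega)]; exact hsm) ?_
    refine List.mem_iff_getElem.mpr ⟨m', by rw [List.length_take]; omega, ?_⟩
    exact hSm m' (by omega)

-- on Pre_ inputs the fueled DFS succeeds
theorem goC_succeeds (adjList : List (List Int)) (values : List Int) (R : List (Int × Int))
    (hvalid : ∀ p ∈ R, PySem.Raise.InRange adjList.length p.1 ∧ PySem.Raise.InRange values.length p.1)
    (hclosed : ∀ p ∈ R, ∀ q ∈ stSuccs adjList p, q ∈ R)
    (hdag : DagProp adjList R)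
    (cand : List (Int × Int)) (hshape : ∀ p ∈ R, p ∈ cand) :
    ∀ (fuel : Nat) (path : List (Int × Int)) (p : Int × Int),
      PathInv adjList R path p →
      cand.length + 2 ≤ fuel + path.length →
      (goC adjList values fuel p.1 p.2).isSome := by
  intro fuel
  induction fuel with
  | zero =>
    intro path p hinv hbound
    exfalso
    have hlen : (p :: path).length ≤ cand.length :=
      nodup_subset_length hinv.2.1 (fun x hx => hshape x (hinv.1 x hx))
    simp at hlen
    omega
  | succ f ih =>
    intro path p hinv hbound
    have hpR : p ∈ R := hinv.1 p List.mem_cons_self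
    have hval := hvalid p hpR
    obtain ⟨vv, hvv⟩ : ∃ x, PySem.List.pyGet? values p.1 = some x := by
      cases h : PySem.List.pyGet? values p.1 with
      | none => exact absurd ((PySem.List.pyGet?_eq_none_iff values p.1).mp h) (by simp [hval.2])
      | some x => exact ⟨x, rfl⟩
    obtain ⟨nbrs, hnbrs⟩ : ∃ l, PySem.List.pyGet? adjList p.1 = some l := by
      cases h : PySem.List.pyGet? adjList p.1 with
      | none => exact absurd ((PySem.List.pyGet?_eq_none_iff adjList p.1).mp h) (by simp [hval.1])
      | some l => exact ⟨l, rfl⟩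
    have hnbrsOf : nbrsOf adjList p.1 = nbrs := by
      unfold nbrsOf
      rw [hnbrs]
      rfl
    have hfold : ∀ rem : List Int, (∀ i ∈ rem, i ∈ nbrsOf adjList p.1) → ∀ curr s : Int,
        (gcdFoldC (fun i => goC adjList values f i p.1) p.2 rem curr s).isSome := by
      intro rem
      induction rem with
      | nil => intro _ curr s; simp [gcdFoldC]
      | cons i r ihr =>
        intro hmem curr s
        have hir : i ∈ nbrsOf adjList p.1 := hmem i List.mem_cons_self
        have hmem' : ∀ x ∈ r, x ∈ nbrsOf adjList p.1 := fun x hx => hmem x (List.mem_cons_of_mem i hx)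
        by_cases hip : i ≠ p.2
        · have hqsucc : (i, p.1) ∈ stSuccs adjList p := by
            unfold stSuccs
            exact List.mem_map.mpr ⟨i, List.mem_filter.mpr ⟨hir, by simpa using hip⟩, rfl⟩
          have hqR : (i, p.1) ∈ R := hclosed p hpR _ hqsucc
          have hinv' : PathInv adjList R (p :: path) (i, p.1) := by
            refine ⟨?_, ?_, ?_⟩
            · intro x hx
              rcases List.mem_cons.mp hx with hxi | hx'
              · rw [hxi]; exact hqR
              · exact hinv.1 x hx'
            · exact List.Nodup.cons (no_reenter adjList R hdag path p hinv (i, p.1) hqsucc hqR) hinv.2.1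
            · rw [List.isChain_cons_cons]
              exact ⟨hqsucc, hinv.2.2⟩
          have hchild := ih (p :: path) (i, p.1) hinv' (by simp; omega)
          obtain ⟨⟨gi, si, ti⟩, hci⟩ := Option.isSome_iff_exists.mp hchild
          have hrest := ihr hmem' (pygcd curr gi) (s + gi)
          obtain ⟨⟨g2, s2, tr⟩, hfr⟩ := Option.isSome_iff_exists.mp hrest
          simp only [gcdFoldC, if_pos hip, hci]
          rw [hfr]
          simp
        · have hrest := ihr hmem' curr s
          obtain ⟨⟨g2, s2, tr⟩, hfr⟩ := Option.isSome_iff_exists.mp hrest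
          simp only [gcdFoldC, if_neg hip]
          rw [hfr]
          simp
    have hfinal := hfold nbrs (by rw [hnbrsOf]; exact fun i hi => hi) vv 0
    obtain ⟨r, hr⟩ := Option.isSome_iff_exists.mp hfinal
    simp only [goC, hvv, hnbrs]
    rw [hr]
    simp

-- the candidate state list bounding the closure (first components are adjacency entries,
-- second components are nodes, plus the root state)
def candList (idx parentV : Int) (adjList : List (List Int)) : List (Int × Int) :=
  (idx, parentV) :: adjList.flatten.flatMap (fun i => (idx :: adjList.flatten).map (fun v => (i, v)))

theorem flatMap_pairs_length (L M : List Int) :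
    (L.flatMap (fun i => M.map (fun v => (i, v)))).length = L.length * M.length := by
  induction L with
  | nil => simp
  | cons a l ih => simp [ih]; ring

theorem candList_length (idx parentV : Int) (adjList : List (List Int)) :
    (candList idx parentV adjList).length =
      1 + adjList.flatten.length * (adjList.flatten.length + 1) := by
  unfold candList
  rw [List.length_cons, flatMap_pairs_length]
  simp
  omega

-- ===== VERDICT (by name: the statement is the Claim_ definition above) =====
theorem compute_spec : Claim_equal_compute := by
  unfold Claim_equal_compute
  intro idx parentV adjList values intermediate final hdom hpre
  unfold Spec_compute
  obtain ⟨hmem0, hvalid, hclosed, hshape, hdagB⟩ := hpre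
  have hdag := dagCheck_sound adjList _ hdagB
  have hsucc := goC_succeeds adjList values (stClosure adjList (idx, parentV))
    (fun p hp => ⟨(hvalid p hp).1, (hvalid p hp).2.1⟩) hclosed hdag
    (candList idx parentV adjList)
    (by
      intro p hp
      rcases hshape p hp with h1 | h2
      · rw [h1]; exact List.mem_cons_self
      · refine List.mem_cons_of_mem _ (List.mem_flatMap.mpr ⟨p.1, h2.1, ?_⟩)
        exact List.mem_map.mpr ⟨p.2, h2.2, rfl⟩)
    (stFuelA adjList) [] (idx, parentV)
    ⟨by
      intro q hq
      simp at hq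
      rw [hq]
      exact hmem0, List.nodup_singleton _, List.isChain_singleton ..⟩
    (by rw [candList_length]; unfold stFuelA; simp; omega)
  obtain ⟨⟨g, s, t⟩, hgo⟩ := Option.isSome_iff_exists.mp hsucc
  have hA : compute idx parentV adjList values intermediate final = g := by
    unfold compute
    rw [computeGo_eq_goC, hgo]
    rfl
  obtain ⟨vv, hvv⟩ : ∃ x, PySem.List.pyGet? values idx = some x := by
    have hval := (hvalid (idx, parentV) hmem0).2.1
    cases h : PySem.List.pyGet? values idx with
    | none => exact absurd ((PySem.List.pyGet?_eq_none_iff values idx).mp h) (by simp [hval])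
    | some x => exact ⟨x, rfl⟩
  have ht : t ≤ (adjList.flatten.length + 3) ^ (stFuelA adjList) :=
    goC_t_le adjList values (stFuelA adjList) idx parentV g s t hgo
  have hB := sim_call adjList values (stFuelA adjList) idx parentV vv [] (computeFuelB adjList) g s t hgo hvv
    (by unfold computeFuelB; exact ht)
  have hBval : compute_alt idx parentV adjList values intermediate final = g := by
    unfold compute_alt
    rw [hvv]
    dsimp only
    rw [hB]
    simp [goBpop]
  rw [hA, hBval]
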